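-- pv_equiv track=rewrite | github.com/daviddelafp/CursoIA | ejercicios.py | ejercicio10
-- ===== SOURCE A (Python) =====
-- def ejercicio10(matriz):
--
--     filas = len(matriz)
--     columnas = len(matriz[0])
--
--     if matriz[0][0] == 1:
--         return False
--
--     matrizComprobar = [[False] * columnas for _ in range(filas)]
--     matrizComprobar[0][0] = True
--
--     # Primera fila
--     for j in range(1, columnas):
--         if matriz[0][j] == 0 and matrizComprobar[0][j-1]:
--             matrizComprobar[0][j] = True
--
--     # Primera columna
--     for i in range(1, filas):
--         if matriz[i][0] == 0 and matrizComprobar[i-1][0]: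
--             matrizComprobar[i][0] = True
--
--     # Resto
--     for i in range(1, filas):
--         for j in range(1, columnas):
--             if matriz[i][j] == 0 and (matrizComprobar[i-1][j] or matrizComprobar[i][j-1]):
--                 matrizComprobar[i][j] = True
--
--     return matrizComprobar[filas-1][columnas-1]
-- ===== SOURCE B (Python) =====
-- def ejercicio10(matriz):
--     filas = len(matriz)
--     columnas = len(matriz[0])
--     if matriz[0][0] == 1:
--         return False
--     visitadas = {(0, 0)}
--     pila = [(0, 0)]
--     while pila:
--         i, j = pila.pop()
--         for ni, nj in ((i, j + 1), (i + 1, j)):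
--             if ni < filas and nj < columnas and (ni, nj) not in visitadas and matriz[ni][nj] == 0:
--                 visitadas.add((ni, nj))
--                 pila.append((ni, nj))
--     return (filas - 1, columnas - 1) in visitadas
-- ===== Notes on version B (the rewrite author's own statement) =====
-- stated objective: alternative
-- what changed: Replaces A's full boolean DP table filled in three staged index loops with an explicit stack-based graph search (DFS over right/down zero neighbours with a visited set) that touches only reachable cells and finally tests membership of the bottom-right corner.
import Mathlib
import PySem

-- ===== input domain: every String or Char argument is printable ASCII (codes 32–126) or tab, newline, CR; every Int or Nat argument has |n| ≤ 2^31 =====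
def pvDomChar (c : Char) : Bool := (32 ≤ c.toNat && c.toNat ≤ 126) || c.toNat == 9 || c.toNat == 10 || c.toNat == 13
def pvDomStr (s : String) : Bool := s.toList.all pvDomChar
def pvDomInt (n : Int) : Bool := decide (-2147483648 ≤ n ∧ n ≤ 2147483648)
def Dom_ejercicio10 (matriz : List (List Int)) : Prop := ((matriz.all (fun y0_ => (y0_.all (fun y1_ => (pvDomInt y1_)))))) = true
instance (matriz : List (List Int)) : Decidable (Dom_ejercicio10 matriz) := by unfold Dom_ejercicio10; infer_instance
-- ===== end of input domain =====

-- B replaces A's full boolean DP table (filled in three staged index loops) by an explicit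
-- stack-based graph search over right/down zero neighbours with a visited set (objective: alternative).

-- ===== PORT A =====
def pvSetCell (m : List (List Bool)) (i j : Nat) : List (List Bool) :=
  m.set i ((m.getD i []).set j true)

def pvGetCell (m : List (List Bool)) (i j : Nat) : Bool :=
  (m.getD i []).getD j false

def ejercicio10 (matriz : List (List Int)) : Bool :=
  let filas := matriz.length
  let columnas := (matriz.getD 0 []).length
  if (matriz.getD 0 []).getD 0 0 = 1 then false
  else
    let mc1 := pvSetCell (List.replicate filas (List.replicate columnas false)) 0 0
    -- Primera fila
    let mc2 := (List.range' 1 (columnas - 1)).foldl (fun mc j =>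
        if decide ((matriz.getD 0 []).getD j 0 = 0) && pvGetCell mc 0 (j-1) then pvSetCell mc 0 j else mc) mc1
    -- Primera columna
    let mc3 := (List.range' 1 (filas - 1)).foldl (fun mc i =>
        if decide ((matriz.getD i []).getD 0 0 = 0) && pvGetCell mc (i-1) 0 then pvSetCell mc i 0 else mc) mc2
    -- Resto
    let mc4 := (List.range' 1 (filas - 1)).foldl (fun mc i =>
        (List.range' 1 (columnas - 1)).foldl (fun mc j =>
          if decide ((matriz.getD i []).getD j 0 = 0) && (pvGetCell mc (i-1) j || pvGetCell mc i (j-1)) then pvSetCell mc i j else mc) mc) mc3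
    pvGetCell mc4 (filas - 1) (columnas - 1)

-- ===== PORT B =====
-- one iteration of the inner 'for (ni, nj) in …' loop body of Source B
def pvTryVisit (matriz : List (List Int)) (F n : Nat)
    (p : List (Nat × Nat) × PySem.Set (Nat × Nat)) (d : Nat × Nat) :
    List (Nat × Nat) × PySem.Set (Nat × Nat) :=
  if d.1 < F ∧ d.2 < n ∧ d ∉ p.2 ∧ (matriz.getD d.1 []).getD d.2 0 = 0
  then (p.1 ++ [d], PySem.Set.add p.2 d) else p

-- the 'while pila:' loop of Source B; fuel (= filas*columnas at the call site) only makes the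
-- recursion structural: each iteration pops one element and every cell is pushed at most once
def pvBucle (matriz : List (List Int)) (F n : Nat) :
    Nat → List (Nat × Nat) → PySem.Set (Nat × Nat) → PySem.Set (Nat × Nat)
  | 0, _, vis => vis
  | _ + 1, [], vis => vis
  | fuel + 1, q :: qs, vis =>
    let c := (q :: qs).getLast (List.cons_ne_nil q qs)
    let rest := (q :: qs).dropLast
    let p := [(c.1, c.2 + 1), (c.1 + 1, c.2)].foldl (pvTryVisit matriz F n) (rest, vis)
    pvBucle matriz F n fuel p.1 p.2

def ejercicio10_alt (matriz : List (List Int)) : Bool :=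
  let filas := matriz.length
  let columnas := (matriz.getD 0 []).length
  if (matriz.getD 0 []).getD 0 0 = 1 then false
  else
    let visitadas := pvBucle matriz filas columnas (filas * columnas)
      [(0, 0)] (PySem.Set.ofList [(0, 0)])
    PySem.Set.contains visitadas (filas - 1, columnas - 1)

-- ===== PRECONDITION & SPEC =====
-- Pre_ excludes exactly the inputs where Python A raises IndexError: the empty matrix, an empty
-- first row, and (unless the matriz[0][0] == 1 guard returns first) a row shorter than the first row.
def Pre_ejercicio10 (matriz : List (List Int)) : Prop :=
  matriz ≠ [] ∧ matriz.getD 0 [] ≠ [] ∧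
    ((matriz.getD 0 []).getD 0 0 = 1 ∨
      ∀ fila ∈ matriz, (matriz.getD 0 []).length ≤ fila.length)

instance (matriz : List (List Int)) : Decidable (Pre_ejercicio10 matriz) := by
  unfold Pre_ejercicio10; infer_instance

def pvWitness_ejercicio10 : List (List Int) := [[0, 0], [1, 0]]

def Spec_ejercicio10 (matriz : List (List Int)) (out : Bool) : Prop := out = ejercicio10_alt matriz
instance (matriz : List (List Int)) (out : Bool) : Decidable (Spec_ejercicio10 matriz out) := by unfold Spec_ejercicio10; infer_instance

-- ===== CLAIM (what is proved, stated in full; the proofs are below) =====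
def Claim_equal_ejercicio10 : Prop := ∀ (matriz : List (List Int)), Dom_ejercicio10 matriz → Pre_ejercicio10 matriz → Spec_ejercicio10 matriz (ejercicio10 matriz)

-- ===== LEMMAS AND PROOFS =====

-- Pointwise specification of A's reachability rows.
def frF (fila : List Int) : Nat → Bool
  | 0 => true
  | j+1 => decide (fila.getD (j+1) 0 = 0) && frF fila j

def nrF (fila : List Int) (prev : Nat → Bool) : Nat → Bool
  | 0 => decide (fila.getD 0 0 = 0) && prev 0
  | j+1 => decide (fila.getD (j+1) 0 = 0) && (prev (j+1) || nrF fila prev j)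

def rowF (matriz : List (List Int)) : Nat → Nat → Bool
  | 0 => frF (matriz.getD 0 [])
  | i+1 => nrF (matriz.getD (i+1) []) (rowF matriz i)

-- Table shape used to describe A's intermediate states.
def tblRow (n : Nat) (f : Nat → Bool) : List Bool := (List.range n).map f
def tbl (F n : Nat) (r : Nat → Nat → Bool) : List (List Bool) :=
  (List.range F).map (fun i => tblRow n (r i))

theorem tblRow_congr (n : Nat) (f g : Nat → Bool) (h : ∀ j < n, f j = g j) :
    tblRow n f = tblRow n g := by
  simp only [tblRow]
  apply List.map_congr_left
  intro j hj; exact h j (List.mem_range.mp hj)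

theorem tbl_congr (F n : Nat) (r r' : Nat → Nat → Bool) (h : ∀ i < F, ∀ j < n, r i j = r' i j) :
    tbl F n r = tbl F n r' := by
  simp only [tbl]
  apply List.map_congr_left
  intro i hi
  exact tblRow_congr n _ _ (h i (List.mem_range.mp hi))

theorem getD_tbl (F n : Nat) (r : Nat → Nat → Bool) (i : Nat) :
    (tbl F n r).getD i [] = if i < F then tblRow n (r i) else [] := by
  by_cases h : i < F <;> simp [tbl, List.getD, h, List.getElem?_map, List.getElem?_range, *]

theorem getD_tblRow (n : Nat) (f : Nat → Bool) (j : Nat) :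
    (tblRow n f).getD j false = if j < n then f j else false := by
  by_cases h : j < n <;> simp [tblRow, List.getD, h, List.getElem?_map, List.getElem?_range]

theorem pvGetCell_tbl (F n : Nat) (r : Nat → Nat → Bool) (i j : Nat) :
    pvGetCell (tbl F n r) i j = if i < F ∧ j < n then r i j else false := by
  simp only [pvGetCell, getD_tbl]
  by_cases hi : i < F
  · rw [if_pos hi, getD_tblRow]
    by_cases hj : j < n <;> simp [hi, hj]
  · rw [if_neg hi]; simp [hi]

theorem set_tblRow (n : Nat) (f : Nat → Bool) (j : Nat) (x : Bool) :
    (tblRow n f).set j x = tblRow n (fun j' => if j' = j then x else f j') := by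
  apply List.ext_getElem
  · simp [tblRow]
  · intro k h1 h2
    simp only [tblRow] at h2 ⊢
    rw [List.getElem_set]
    have hk : k < n := by simpa [tblRow] using h2
    by_cases h : j = k <;> simp [List.getElem_map, List.getElem_range, hk, h]
    omega

theorem pvSetCell_tbl (F n : Nat) (r : Nat → Nat → Bool) (i j : Nat) :
    pvSetCell (tbl F n r) i j =
      tbl F n (fun i' j' => if i' = i ∧ j' = j then true else r i' j') := by
  simp only [pvSetCell, getD_tbl]
  by_cases hi : i < F
  · simp only [hi, if_pos, set_tblRow]
    apply List.ext_getElem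
    · simp [tbl]
    · intro k h1 h2
      have hk : k < F := by simpa [tbl] using h2
      rw [List.getElem_set]
      by_cases h : i = k
      · subst h
        simp [tbl, List.getElem_map, List.getElem_range, hk]
      · simp [tbl, List.getElem_map, List.getElem_range, hk, h]
        apply tblRow_congr
        intro j' _
        simp [h]
        intro h1
        exact absurd h1.symm h
  · have h1 : F ≤ i := Nat.le_of_not_lt hi
    rw [List.set_eq_of_length_le (by simp [tbl]; omega)]
    apply tbl_congr
    intro i' hi' j' _
    have : ¬(i' = i ∧ j' = j) := fun hc => by omega
    simp [this]

theorem replicate_eq_tbl (F n : Nat) :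
    List.replicate F (List.replicate n false) = tbl F n (fun _ _ => false) := by
  apply List.ext_getElem
  · simp [tbl]
  · intro k h1 h2
    have hk : k < F := by simpa using h1
    simp [tbl, List.getElem_map, List.getElem_range, hk, List.getElem_replicate, tblRow]

theorem rowF_zero_col (matriz : List (List Int)) :
    ∀ i, rowF matriz (i+1) 0
      = (decide ((matriz.getD (i+1) []).getD 0 0 = 0) && rowF matriz i 0) := by
  intro i; simp [rowF, nrF]

theorem phase1_spec (matriz : List (List Int)) (F n : Nat) (hF : 0 < F) (hn : 0 < n) :
    ∀ k, k ≤ n - 1 →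
      ((List.range' 1 k).foldl (fun mc j =>
        if decide ((matriz.getD 0 []).getD j 0 = 0) && pvGetCell mc 0 (j-1) then pvSetCell mc 0 j else mc)
        (tbl F n (fun i j => if i = 0 ∧ j = 0 then true else false)))
      = tbl F n (fun i j => if i = 0 ∧ j ≤ k then frF (matriz.getD 0 []) j else false) := by
  intro k hk
  induction k with
  | zero =>
    simp only [List.range', List.foldl_nil]
    apply tbl_congr; intro i _ j _
    by_cases hi : i = 0 <;> by_cases hj : j = 0 <;> simp [hi, hj, frF] <;> omega
  | succ k ih =>
    have ih' := ih (by omega)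
    rw [List.range'_concat, List.foldl_append, ih']
    simp only [List.foldl_cons, List.foldl_nil, Nat.one_mul]
    rw [pvGetCell_tbl]
    have h1k : 1 + k - 1 = k := by omega
    have hkn : k < n := by omega
    rw [h1k]
    simp only [hF, hkn, and_self, if_pos, true_and]
    rw [if_pos (Nat.le_refl k)]
    by_cases hc : (decide ((matriz.getD 0 []).getD (1+k) 0 = 0) && frF (matriz.getD 0 []) k) = true
    · rw [if_pos hc, pvSetCell_tbl]
      apply tbl_congr; intro i _ j _
      by_cases hi : i = 0
      · subst hi
        by_cases hj : j = 1 + k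
        · subst hj
          have : frF (matriz.getD 0 []) (1+k) = true := by
            have : 1 + k = k + 1 := by omega
            rw [this, frF]
            have : k + 1 = 1 + k := by omega
            rw [this]; exact hc
          simp
          exact ⟨by omega, this⟩
        · by_cases hjk : j ≤ k <;> simp [hj, hjk] <;> try omega
      · simp [hi]
    · rw [if_neg hc]
      apply tbl_congr; intro i _ j _
      by_cases hi : i = 0
      · subst hi
        by_cases hj : j = 1 + k
        · subst hj
          have : frF (matriz.getD 0 []) (1+k) = false := by
            have h2 : 1 + k = k + 1 := by omega
            rw [h2, frF]
            have h3 : k + 1 = 1 + k := by omega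
            rw [h3]
            simpa using hc
          rw [if_neg (show ¬((0:Nat) = 0 ∧ 1 + k ≤ k) from by omega),
              if_pos (show (0:Nat) = 0 ∧ 1 + k ≤ k + 1 from ⟨rfl, by omega⟩), this]
        · by_cases hjk : j ≤ k <;> simp [hj, hjk] <;> try omega
      · simp [hi]

theorem phase2_spec (matriz : List (List Int)) (F n : Nat) (hF : 0 < F) (hn : 0 < n) :
    ∀ k, k ≤ F - 1 →
      ((List.range' 1 k).foldl (fun mc i =>
        if decide ((matriz.getD i []).getD 0 0 = 0) && pvGetCell mc (i-1) 0 then pvSetCell mc i 0 else mc)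
        (tbl F n (fun i j => if i = 0 then frF (matriz.getD 0 []) j else false)))
      = tbl F n (fun i j => if i = 0 then frF (matriz.getD 0 []) j
          else if j = 0 ∧ i ≤ k then rowF matriz i 0 else false) := by
  intro k hk
  induction k with
  | zero =>
    simp only [List.range', List.foldl_nil]
    apply tbl_congr; intro i _ j _
    by_cases hi : i = 0 <;> simp [hi] <;> omega
  | succ k ih =>
    have ih' := ih (by omega)
    rw [List.range'_concat, List.foldl_append, ih']
    simp only [List.foldl_cons, List.foldl_nil, Nat.one_mul]
    rw [pvGetCell_tbl]
    have h1k : 1 + k - 1 = k := by omega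
    have hkF : k < F := by omega
    rw [h1k]
    simp only [hkF, hn, and_self, if_pos, true_and]
    rw [show (if k = 0 then frF (matriz.getD 0 []) 0
        else if k ≤ k then rowF matriz k 0 else false) = rowF matriz k 0 from by
      by_cases h : k = 0
      · subst h; simp [rowF]
      · rw [if_neg h, if_pos (Nat.le_refl k)]]
    have hrec : rowF matriz (1+k) 0
        = (decide ((matriz.getD (1+k) []).getD 0 0 = 0) && rowF matriz k 0) := by
      have : 1 + k = k + 1 := by omega
      rw [this, rowF_zero_col]
    by_cases hc : (decide ((matriz.getD (1+k) []).getD 0 0 = 0) && rowF matriz k 0) = true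
    · rw [if_pos hc, pvSetCell_tbl]
      apply tbl_congr; intro i _ j _
      by_cases hi0 : i = 0
      · subst hi0; simp
        try omega
      · by_cases hij : i = 1 + k ∧ j = 0
        · obtain ⟨hi, hj⟩ := hij; subst hi; subst hj
          rw [if_pos (show 1 + k = 1 + k ∧ (0:Nat) = 0 from ⟨rfl, rfl⟩),
              if_neg (show ¬(1 + k = 0) from by omega),
              if_pos (show (0:Nat) = 0 ∧ 1 + k ≤ k + 1 from ⟨rfl, by omega⟩)]
          exact (hrec.trans hc).symm
        · have hne : ¬(i = 1 + k ∧ j = 0) := hij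
          rw [if_neg hne]
          by_cases hj0 : j = 0
          · subst hj0
            have hik : i ≠ 1 + k := fun h => hne ⟨h, rfl⟩
            by_cases hik2 : i ≤ k <;> simp [hi0, hik2] <;> try omega
          · simp [hi0, hj0]
    · rw [if_neg hc]
      apply tbl_congr; intro i _ j _
      by_cases hi0 : i = 0
      · simp [hi0]
      · by_cases hj0 : j = 0
        · subst hj0
          by_cases hik : i = 1 + k
          · subst hik
            have hrf : rowF matriz (1+k) 0 = false := by rw [hrec]; simpa using hc
            rw [if_neg (show ¬(1 + k = 0) from by omega),
                if_neg (show ¬((0:Nat) = 0 ∧ 1 + k ≤ k) from by omega),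
                if_neg (show ¬(1 + k = 0) from by omega),
                if_pos (show (0:Nat) = 0 ∧ 1 + k ≤ k + 1 from ⟨rfl, by omega⟩), hrf]
          · by_cases hik2 : i ≤ k <;> simp [hi0, hik, hik2] <;> try omega
        · simp [hi0, hj0]

-- state of the table before processing row r in phase 3, with columns ≤ l of row r done
def p3state (matriz : List (List Int)) (r l : Nat) : Nat → Nat → Bool :=
  fun i j => if i < r then rowF matriz i j
    else if i = r ∧ j ≤ l then rowF matriz i j
    else if j = 0 then rowF matriz i 0 else false

theorem p3state_mono (matriz : List (List Int)) (r l i j : Nat) (h : ¬(i = r ∧ j = 1 + l)) :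
    p3state matriz r l i j = p3state matriz r (l+1) i j := by
  simp only [p3state]
  by_cases h1 : i < r
  · simp [h1]
  · by_cases h2 : i = r
    · by_cases h3 : j ≤ l
      · have h4 : j ≤ l + 1 := by omega
        simp [h1, h2, h3, h4]
      · have h4 : ¬ j ≤ l + 1 := by
          have : ¬ j = 1 + l := fun hj => h ⟨h2, hj⟩
          omega
        simp [h1, h2, h3, h4]
    · simp [h1, h2]

theorem phase3_inner (matriz : List (List Int)) (F n : Nat) (hF : 0 < F) (hn : 0 < n)
    (r : Nat) (hr : 0 < r) (hrF : r < F) :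
    ∀ l, l ≤ n - 1 →
      ((List.range' 1 l).foldl (fun mc j =>
        if decide ((matriz.getD r []).getD j 0 = 0) && (pvGetCell mc (r-1) j || pvGetCell mc r (j-1)) then pvSetCell mc r j else mc)
        (tbl F n (p3state matriz r 0)))
      = tbl F n (p3state matriz r l) := by
  intro l hl
  induction l with
  | zero => simp [List.range']
  | succ l ih =>
    have ih' := ih (by omega)
    rw [List.range'_concat, List.foldl_append, ih']
    simp only [List.foldl_cons, List.foldl_nil, Nat.one_mul]
    rw [pvGetCell_tbl, pvGetCell_tbl]
    have h1l : 1 + l - 1 = l := by omega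
    have hr1 : r - 1 < F := by omega
    have hln : l < n := by omega
    have h1ln : 1 + l < n := by omega
    rw [h1l]
    simp only [hr1, hrF, hln, h1ln, and_self, and_true, true_and, if_pos]
    have hup : p3state matriz r l (r-1) (1+l) = rowF matriz (r-1) (1+l) := by
      simp [p3state, show r - 1 < r from by omega]
    have hleft : p3state matriz r l r l = rowF matriz r l := by
      simp [p3state]
    rw [hup, hleft]
    have hrec : rowF matriz r (1+l)
        = (decide ((matriz.getD r []).getD (1+l) 0 = 0) && (rowF matriz (r-1) (1+l) || rowF matriz r l)) := by
      obtain ⟨r', rfl⟩ : ∃ r', r = r' + 1 := ⟨r - 1, by omega⟩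
      rw [show 1 + l = l + 1 from by omega]
      simp only [rowF, nrF, Nat.add_sub_cancel]
    by_cases hc : (decide ((matriz.getD r []).getD (1+l) 0 = 0) && (rowF matriz (r-1) (1+l) || rowF matriz r l)) = true
    · rw [if_pos hc, pvSetCell_tbl]
      apply tbl_congr; intro i _ j _
      by_cases hij : i = r ∧ j = 1 + l
      · rw [if_pos hij]
        have hR : p3state matriz r (l+1) i j = rowF matriz r (1+l) := by
          simp [p3state, hij.1, hij.2, show 1 + l ≤ l + 1 from by omega]
        rw [hR]
        exact (hrec.trans hc).symm
      · rw [if_neg hij]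
        exact p3state_mono matriz r l i j hij
    · rw [if_neg hc]
      apply tbl_congr; intro i _ j _
      by_cases hij : i = r ∧ j = 1 + l
      · have hrf : rowF matriz r (1+l) = false := by
          rw [hrec]; simpa using hc
        have hL : p3state matriz r l r (1+l) = false := by
          simp [p3state, show ¬(1 + l ≤ l) from by omega, show ¬(1 + l = 0) from by omega]
        have hR : p3state matriz r (l+1) r (1+l) = rowF matriz r (1+l) := by
          simp [p3state, show 1 + l ≤ l + 1 from by omega]
        rw [hij.1, hij.2, hL, hR, hrf]
      · exact p3state_mono matriz r l i j hij

theorem p3state_shift (matriz : List (List Int)) (F n : Nat) (k : Nat) :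
    ∀ i < F, ∀ j < n, p3state matriz (k+1) (n-1) i j =
      (fun i j => if i ≤ k + 1 then rowF matriz i j else if j = 0 then rowF matriz i 0 else false) i j := by
  intro i _ j hj
  simp only [p3state]
  by_cases h1 : i < k + 1
  · have h4 : i ≤ k + 1 := by omega
    simp [h1, h4]
  · by_cases h2 : i = k + 1
    · subst h2
      have h3 : j ≤ n - 1 := by omega
      simp [h1, h3]
    · have h3 : ¬ i ≤ k + 1 := by omega
      simp [h1, h2, h3]

theorem phase3_outer (matriz : List (List Int)) (F n : Nat) (hF : 0 < F) (hn : 0 < n) :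
    ∀ k, k ≤ F - 1 →
      ((List.range' 1 k).foldl (fun mc i =>
        (List.range' 1 (n-1)).foldl (fun mc j =>
          if decide ((matriz.getD i []).getD j 0 = 0) && (pvGetCell mc (i-1) j || pvGetCell mc i (j-1)) then pvSetCell mc i j else mc) mc)
        (tbl F n (fun i j => if i = 0 then frF (matriz.getD 0 []) j
          else if j = 0 ∧ i ≤ F - 1 then rowF matriz i 0 else false)))
      = tbl F n (fun i j => if i ≤ k then rowF matriz i j
          else if j = 0 then rowF matriz i 0 else false) := by
  intro k hk
  induction k with
  | zero =>
    simp only [List.range', List.foldl_nil]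
    apply tbl_congr; intro i hi j _
    by_cases hi0 : i = 0
    · subst hi0; simp [rowF]
    · have : ¬ i ≤ 0 := by omega
      by_cases hj0 : j = 0 <;> simp [hi0, hj0, this] <;> omega
  | succ k ih =>
    have ih' := ih (by omega)
    rw [List.range'_concat, List.foldl_append, ih']
    have hstart : tbl F n (fun i j => if i ≤ k then rowF matriz i j
        else if j = 0 then rowF matriz i 0 else false) = tbl F n (p3state matriz (1+k) 0) := by
      apply tbl_congr; intro i _ j _
      simp only [p3state]
      by_cases h1 : i ≤ k
      · have : i < 1 + k := by omega
        simp [h1, this]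
      · have h2 : ¬ i < 1 + k := by omega
        by_cases h3 : i = 1 + k
        · subst h3
          by_cases hj : j = 0
          · subst hj; simp [h2]
          · simp [h1, h2, hj]
        · by_cases hj : j = 0 <;> simp [h1, h2, h3, hj]
    simp only [List.foldl_cons, List.foldl_nil]
    rw [hstart]
    have hinner := phase3_inner matriz F n hF hn (1+k) (by omega) (by omega) (n-1) (Nat.le_refl _)
    simp only [Nat.one_mul]
    rw [hinner]
    apply tbl_congr
    intro i hi j hj
    have := p3state_shift matriz F n k i hi j hj
    have h1k : 1 + k = k + 1 := by omega
    rw [h1k]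
    rw [this]

-- A's port computes exactly rowF at the bottom-right corner (guard-false case).
theorem A_eq_corner (matriz : List (List Int)) (hne : matriz ≠ [])
    (hrow : matriz.getD 0 [] ≠ []) (hguard : ¬ (matriz.getD 0 []).getD 0 0 = 1) :
    ejercicio10 matriz = rowF matriz (matriz.length - 1) ((matriz.getD 0 []).length - 1) := by
  have hF : 0 < matriz.length := List.length_pos_iff.mpr hne
  have hn : 0 < (matriz.getD 0 []).length := List.length_pos_iff.mpr hrow
  set F := matriz.length with hFdef
  set n := (matriz.getD 0 []).length with hndef
  unfold ejercicio10
  simp only [hguard, if_false]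
  have hmc1 : pvSetCell (List.replicate F (List.replicate n false)) 0 0
      = tbl F n (fun i j => if i = 0 ∧ j = 0 then true else false) := by
    rw [replicate_eq_tbl, pvSetCell_tbl]
  rw [hmc1, phase1_spec matriz F n hF hn (n-1) (Nat.le_refl _)]
  have hmid : tbl F n (fun i j => if i = 0 ∧ j ≤ n - 1 then frF (matriz.getD 0 []) j else false)
      = tbl F n (fun i j => if i = 0 then frF (matriz.getD 0 []) j else false) := by
    apply tbl_congr; intro i _ j hj
    by_cases hi : i = 0 <;> simp [hi]
    omega
  rw [hmid, phase2_spec matriz F n hF hn (F-1) (Nat.le_refl _),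
      phase3_outer matriz F n hF hn (F-1) (Nat.le_refl _), pvGetCell_tbl]
  have hFr : F - 1 < F := by omega
  have hnr : n - 1 < n := by omega
  rw [if_pos (show F - 1 < F ∧ n - 1 < n from ⟨hFr, hnr⟩)]
  rw [if_pos (show F - 1 ≤ F - 1 from Nat.le_refl _)]

-- ===== B-side: graph-reachability characterisation =====

def adjG (c d : Nat × Nat) : Prop := d = (c.1, c.2 + 1) ∨ d = (c.1 + 1, c.2)

def goodC (matriz : List (List Int)) (F n : Nat) (d : Nat × Nat) : Prop :=
  d.1 < F ∧ d.2 < n ∧ (matriz.getD d.1 []).getD d.2 0 = 0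

inductive ReachP (matriz : List (List Int)) (F n : Nat) : Nat × Nat → Prop
  | start : ReachP matriz F n (0, 0)
  | step {c d : Nat × Nat} : ReachP matriz F n c → adjG c d → goodC matriz F n d →
      ReachP matriz F n d

theorem rowF_to_reach (matriz : List (List Int)) (F n : Nat) :
    ∀ i, i < F → ∀ j, j < n → rowF matriz i j = true → ReachP matriz F n (i, j) := by
  intro i
  induction i with
  | zero =>
    intro _ j
    induction j with
    | zero => intro _ _; exact ReachP.start
    | succ j ihj =>
      intro hj hr
      simp only [rowF, frF, Bool.and_eq_true, decide_eq_true_eq] at hr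
      exact ReachP.step (ihj (by omega) hr.2) (Or.inl rfl) ⟨by omega, hj, hr.1⟩
  | succ i ihi =>
    intro hiF j
    induction j with
    | zero =>
      intro hj hr
      simp only [rowF, nrF, Bool.and_eq_true, decide_eq_true_eq] at hr
      exact ReachP.step (ihi (by omega) 0 hj hr.2) (Or.inr rfl) ⟨hiF, hj, hr.1⟩
    | succ j ihj =>
      intro hj hr
      simp only [rowF, nrF, Bool.and_eq_true, Bool.or_eq_true, decide_eq_true_eq] at hr
      rcases hr.2 with hup | hleft
      · exact ReachP.step (ihi (by omega) (j+1) hj hup) (Or.inr rfl) ⟨hiF, hj, hr.1⟩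
      · have : rowF matriz (i+1) j = true := by
          simp only [rowF]; exact hleft
        exact ReachP.step (ihj (by omega) this) (Or.inl rfl) ⟨hiF, hj, hr.1⟩

theorem reach_to_rowF (matriz : List (List Int)) (F n : Nat) :
    ∀ d, ReachP matriz F n d → rowF matriz d.1 d.2 = true := by
  intro d hd
  induction hd with
  | start => simp [rowF, frF]
  | @step c d _ hadj hg ih =>
    rcases hadj with h | h <;> subst h
    · -- right move: d = (c.1, c.2 + 1)
      cases hc1 : c.1 with
      | zero =>
        rw [hc1] at ih hg
        simp only [rowF, frF, Bool.and_eq_true, decide_eq_true_eq]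
        exact ⟨hg.2.2, by simpa [rowF] using ih⟩
      | succ i' =>
        rw [hc1] at ih hg
        simp only [rowF, nrF, Bool.and_eq_true, Bool.or_eq_true, decide_eq_true_eq]
        refine ⟨hg.2.2, Or.inr ?_⟩
        simpa [rowF] using ih
    · -- down move: d = (c.1 + 1, c.2)
      cases hc2 : c.2 with
      | zero =>
        rw [hc2] at ih hg
        simp only [rowF, nrF, Bool.and_eq_true, decide_eq_true_eq]
        exact ⟨hg.2.2, ih⟩
      | succ j' =>
        rw [hc2] at ih hg
        simp only [rowF, nrF, Bool.and_eq_true, Bool.or_eq_true, decide_eq_true_eq]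
        exact ⟨hg.2.2, Or.inl ih⟩

-- a Nodup list of in-bounds cells has at most F*n elements
theorem nodup_cells_length_le (F n : Nat) (l : List (Nat × Nat)) (hnd : l.Nodup)
    (hb : ∀ c ∈ l, c.1 < F ∧ c.2 < n) : l.length ≤ F * n := by
  have h1 : l.toFinset.card = l.length := List.toFinset_card_of_nodup hnd
  have h2 : l.toFinset ⊆ Finset.range F ×ˢ Finset.range n := by
    intro c hc
    rcases hb c (List.mem_toFinset.mp hc) with ⟨h3, h4⟩
    simp [Finset.mem_product, Finset.mem_range]
    exact ⟨h3, h4⟩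
  calc l.length = l.toFinset.card := h1.symm
    _ ≤ (Finset.range F ×ˢ Finset.range n).card := Finset.card_le_card h2
    _ = F * n := by simp [Finset.card_product]

-- what the two-neighbour inner loop does: it appends the same (fresh, admissible) cells zs
-- to both the stack and the visited set
theorem pairStep_spec (matriz : List (List Int)) (F n : Nat)
    (rest : List (Nat × Nat)) (vis : PySem.Set (Nat × Nat)) (c : Nat × Nat) :
    ∃ zs : List (Nat × Nat),
      ([(c.1, c.2 + 1), (c.1 + 1, c.2)].foldl (pvTryVisit matriz F n) (rest, vis))
        = (rest ++ zs, vis ++ zs) ∧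
      zs.Nodup ∧
      (∀ x ∈ zs, adjG c x ∧ goodC matriz F n x ∧ x ∉ vis) ∧
      (∀ d, adjG c d → goodC matriz F n d → d ∈ vis ++ zs) := by
  have hd12 : (c.1, c.2 + 1) ≠ (c.1 + 1, c.2) := by
    intro h
    rw [Prod.ext_iff] at h
    omega
  simp only [List.foldl_cons, List.foldl_nil]
  have tv_pos : ∀ (st : List (Nat × Nat)) (v : PySem.Set (Nat × Nat)) (d : Nat × Nat),
      goodC matriz F n d → d ∉ v →
      pvTryVisit matriz F n (st, v) d = (st ++ [d], v ++ [d]) := by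
    intro st v d hg hnv
    unfold pvTryVisit
    rw [if_pos ⟨hg.1, hg.2.1, hnv, hg.2.2⟩, PySem.Set.add_of_not_mem hnv]
  have tv_neg : ∀ (st : List (Nat × Nat)) (v : PySem.Set (Nat × Nat)) (d : Nat × Nat),
      ¬(goodC matriz F n d ∧ d ∉ v) →
      pvTryVisit matriz F n (st, v) d = (st, v) := by
    intro st v d h
    unfold pvTryVisit
    rw [if_neg (by unfold goodC at h; tauto)]
  by_cases h1 : goodC matriz F n (c.1, c.2 + 1) ∧ (c.1, c.2 + 1) ∉ vis
  · rw [tv_pos _ _ _ h1.1 h1.2]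
    by_cases h2 : goodC matriz F n (c.1 + 1, c.2) ∧ (c.1 + 1, c.2) ∉ vis ++ [(c.1, c.2 + 1)]
    · rw [tv_pos _ _ _ h2.1 h2.2]
      refine ⟨[(c.1, c.2 + 1), (c.1 + 1, c.2)], by simp, by simp [hd12], ?_, ?_⟩
      · intro x hx
        rcases List.mem_cons.mp hx with h | h
        · subst h; exact ⟨Or.inl rfl, h1.1, h1.2⟩
        · have hx2 : x = (c.1 + 1, c.2) := by simpa using h
          subst hx2
          exact ⟨Or.inr rfl, h2.1, fun hmem => h2.2 (List.mem_append_left _ hmem)⟩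
      · intro d hadj _
        rcases hadj with h | h <;> subst h <;> simp
    · rw [tv_neg _ _ _ h2]
      refine ⟨[(c.1, c.2 + 1)], by simp, by simp, ?_, ?_⟩
      · intro x hx
        have hx1 : x = (c.1, c.2 + 1) := by simpa using hx
        subst hx1
        exact ⟨Or.inl rfl, h1.1, h1.2⟩
      · intro d hadj hg
        rcases hadj with h | h <;> subst h
        · simp
        · have : (c.1 + 1, c.2) ∈ vis ++ [(c.1, c.2 + 1)] := by tauto
          simpa using this
  · rw [tv_neg _ _ _ h1]
    by_cases h2 : goodC matriz F n (c.1 + 1, c.2) ∧ (c.1 + 1, c.2) ∉ vis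
    · rw [tv_pos _ _ _ h2.1 h2.2]
      refine ⟨[(c.1 + 1, c.2)], by simp, by simp, ?_, ?_⟩
      · intro x hx
        have hx2 : x = (c.1 + 1, c.2) := by simpa using hx
        subst hx2
        exact ⟨Or.inr rfl, h2.1, h2.2⟩
      · intro d hadj hg
        rcases hadj with h | h <;> subst h
        · have : (c.1, c.2 + 1) ∈ vis := by tauto
          simp [this]
        · simp
    · rw [tv_neg _ _ _ h2]
      refine ⟨[], by simp, by simp, by simp, ?_⟩
      intro d hadj hg
      rcases hadj with h | h <;> subst h <;> simp <;> tauto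

-- the BFS loop invariant and its consequences
def InvB (matriz : List (List Int)) (F n : Nat)
    (st : List (Nat × Nat)) (vis : List (Nat × Nat)) : Prop :=
  (∀ c ∈ st, c ∈ vis) ∧ st.Nodup ∧ vis.Nodup ∧
  (∀ c ∈ vis, c.1 < F ∧ c.2 < n) ∧ (∀ c ∈ vis, ReachP matriz F n c) ∧
  (∀ c ∈ vis, c ∉ st → ∀ d, adjG c d → goodC matriz F n d → d ∈ vis)

theorem bfs_main (matriz : List (List Int)) (F n : Nat) :
    ∀ fuel (st : List (Nat × Nat)) (vis : PySem.Set (Nat × Nat)),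
      InvB matriz F n st vis → st.length + (F * n - vis.length) ≤ fuel →
      (∀ c ∈ vis, c ∈ pvBucle matriz F n fuel st vis) ∧
      (∀ c ∈ pvBucle matriz F n fuel st vis, ReachP matriz F n c) ∧
      (∀ c ∈ pvBucle matriz F n fuel st vis, ∀ d, adjG c d → goodC matriz F n d →
        d ∈ pvBucle matriz F n fuel st vis) := by
  intro fuel
  induction fuel with
  | zero =>
    intro st vis hInv hfuel
    have hst : st = [] := List.eq_nil_of_length_eq_zero (by omega)
    subst hst
    obtain ⟨_, _, _, _, hR, hcl⟩ := hInv
    exact ⟨fun c hc => by simpa [pvBucle] using hc,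
      fun c hc => hR c (by simpa [pvBucle] using hc),
      fun c hc d hadj hg => by
        simp only [pvBucle] at hc ⊢
        exact hcl c hc (by simp) d hadj hg⟩
  | succ fuel ih =>
    intro st vis hInv hfuel
    obtain ⟨hsv, hndS, hndV, hb, hR, hcl⟩ := hInv
    match st with
    | [] =>
      exact ⟨fun c hc => by simpa [pvBucle] using hc,
        fun c hc => hR c (by simpa [pvBucle] using hc),
        fun c hc d hadj hg => by
          simp only [pvBucle] at hc ⊢
          exact hcl c hc (by simp) d hadj hg⟩
    | q :: qs =>
      set c := (q :: qs).getLast (List.cons_ne_nil q qs) with hc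
      set rest := (q :: qs).dropLast with hrest
      have hdecomp : rest ++ [c] = q :: qs := List.dropLast_append_getLast (List.cons_ne_nil q qs)
      obtain ⟨zs, hfold, hznd, hzprop, hcomplete⟩ :=
        pairStep_spec matriz F n rest vis c
      have hstep : pvBucle matriz F n (fuel + 1) (q :: qs) vis
          = pvBucle matriz F n fuel (rest ++ zs) (vis ++ zs) := by
        simp only [pvBucle]
        rw [← hc, ← hrest, hfold]
      have hcvis : c ∈ vis := hsv c (by rw [← hdecomp]; simp)
      have hcR : ReachP matriz F n c := hR c hcvis
      have hrest_sub : ∀ x ∈ rest, x ∈ vis := fun x hx =>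
        hsv x (by rw [← hdecomp]; exact List.mem_append_left _ hx)
      have hz_not_vis : ∀ x ∈ zs, x ∉ vis := fun x hx => (hzprop x hx).2.2
      have hdisj_rest : rest.Disjoint zs := fun x hx hx' => hz_not_vis x hx' (hrest_sub x hx)
      have hdisj_vis : vis.Disjoint zs := fun x hx hx' => hz_not_vis x hx' hx
      have hndS' : (rest ++ zs).Nodup :=
        List.Nodup.append ((hndS.sublist (by rw [← hdecomp]; exact List.sublist_append_left _ _))) hznd hdisj_rest
      have hndV' : (vis ++ zs).Nodup := List.Nodup.append hndV hznd hdisj_vis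
      have hb' : ∀ x ∈ vis ++ zs, x.1 < F ∧ x.2 < n := by
        intro x hx
        rcases List.mem_append.mp hx with h | h
        · exact hb x h
        · exact ⟨(hzprop x h).2.1.1, (hzprop x h).2.1.2.1⟩
      have hR' : ∀ x ∈ vis ++ zs, ReachP matriz F n x := by
        intro x hx
        rcases List.mem_append.mp hx with h | h
        · exact hR x h
        · exact ReachP.step hcR (hzprop x h).1 (hzprop x h).2.1
      have hInv' : InvB matriz F n (rest ++ zs) (vis ++ zs) := by
        refine ⟨?_, hndS', hndV', hb', hR', ?_⟩
        · intro x hx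
          rcases List.mem_append.mp hx with h | h
          · exact List.mem_append_left _ (hrest_sub x h)
          · exact List.mem_append_right _ h
        · intro x hx hxs d hadj hg
          rcases List.mem_append.mp hx with hxv | hxz
          · by_cases hxc : x = c
            · subst hxc
              exact hcomplete d hadj hg
            · have hxnotst : x ∉ q :: qs := by
                rw [← hdecomp]
                intro hmem
                rcases List.mem_append.mp hmem with h | h
                · exact hxs (List.mem_append_left _ h)
                · exact hxc (by simpa using h)
              exact List.mem_append_left _ (hcl x hxv hxnotst d hadj hg)
          · exact absurd (List.mem_append_right rest hxz) hxs
      have hlen : (vis ++ zs).length ≤ F * n := nodup_cells_length_le F n _ hndV' hb'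
      have hrl : rest.length + 1 = (q :: qs).length := by
        rw [← hdecomp]; simp
      have hfuel' : (rest ++ zs).length + (F * n - (vis ++ zs).length) ≤ fuel := by
        simp only [List.length_append] at *
        omega
      have hres := ih (rest ++ zs) (vis ++ zs) hInv' hfuel'
      rw [hstep]
      exact ⟨fun x hx => hres.1 x (List.mem_append_left _ hx), hres.2.1, hres.2.2⟩

theorem reach_in_result (matriz : List (List Int)) (F n : Nat) (R : List (Nat × Nat))
    (h00 : (0, 0) ∈ R)
    (hclosed : ∀ c ∈ R, ∀ d, adjG c d → goodC matriz F n d → d ∈ R) :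
    ∀ d, ReachP matriz F n d → d ∈ R := by
  intro d hd
  induction hd with
  | start => exact h00
  | step hc hadj hg ih => exact hclosed _ ih _ hadj hg

-- B's port computes exactly rowF at the bottom-right corner (guard-false case).
theorem B_eq_corner (matriz : List (List Int)) (hne : matriz ≠ [])
    (hrow : matriz.getD 0 [] ≠ []) (hguard : ¬ (matriz.getD 0 []).getD 0 0 = 1) :
    ejercicio10_alt matriz = rowF matriz (matriz.length - 1) ((matriz.getD 0 []).length - 1) := by
  have hF : 0 < matriz.length := List.length_pos_iff.mpr hne
  have hn : 0 < (matriz.getD 0 []).length := List.length_pos_iff.mpr hrow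
  set F := matriz.length with hFdef
  set n := (matriz.getD 0 []).length with hndef
  have hFn : 0 < F * n := Nat.mul_pos hF hn
  unfold ejercicio10_alt
  simp only [← hFdef, ← hndef, hguard, if_false]
  have hInv0 : InvB matriz F n [(0, 0)] (PySem.Set.ofList [(0, 0)]) := by
    refine ⟨?_, by simp, by simp [PySem.Set.ofList], ?_, ?_, ?_⟩
    · intro c hc; simpa [PySem.Set.ofList] using hc
    · intro c hc
      have : c = ((0 : Nat), (0 : Nat)) := by simpa [PySem.Set.ofList] using hc
      subst this
      exact ⟨hF, hn⟩
    · intro c hc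
      have : c = ((0 : Nat), (0 : Nat)) := by simpa [PySem.Set.ofList] using hc
      subst this
      exact ReachP.start
    · intro c hc hcs
      exact absurd (by simpa [PySem.Set.ofList] using hc) (by simpa using hcs)
  have hfuel0 : ([((0 : Nat), (0 : Nat))] : List (Nat × Nat)).length
      + (F * n - (PySem.Set.ofList [((0 : Nat), (0 : Nat))]).length) ≤ F * n := by
    simp [PySem.Set.ofList]
    omega
  obtain ⟨hsub, hsound, hclosed⟩ := bfs_main matriz F n (F * n) [(0, 0)] (PySem.Set.ofList [(0, 0)]) hInv0 hfuel0
  set R := pvBucle matriz F n (F * n) [(0, 0)] (PySem.Set.ofList [(0, 0)]) with hR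
  have h00R : ((0 : Nat), (0 : Nat)) ∈ R := hsub _ (by simp [PySem.Set.ofList])
  by_cases h : rowF matriz (F - 1) (n - 1) = true
  · rw [h]
    have : (F - 1, n - 1) ∈ R :=
      reach_in_result matriz F n R h00R hclosed _
        (rowF_to_reach matriz F n (F - 1) (by omega) (n - 1) (by omega) h)
    simpa [PySem.Set.contains_iff] using this
  · rw [Bool.not_eq_true] at h
    rw [h]
    have : (F - 1, n - 1) ∉ R := by
      intro hmem
      have := reach_to_rowF matriz F n _ (hsound _ hmem)
      simp only at this
      rw [h] at this
      exact Bool.false_ne_true this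
    simp only [Bool.eq_false_iff]
    intro hcontr
    exact this ((PySem.Set.contains_iff _ _).mp hcontr)

-- ===== VERDICT (by name: the statement is the Claim_ definition above) =====
theorem ejercicio10_spec : Claim_equal_ejercicio10 := by
  intro matriz _ hpre
  unfold Spec_ejercicio10
  obtain ⟨hne, hrow, _⟩ := hpre
  by_cases hguard : (matriz.getD 0 []).getD 0 0 = 1
  · unfold ejercicio10 ejercicio10_alt
    simp only [hguard, if_pos]
  · rw [A_eq_corner matriz hne hrow hguard, B_eq_corner matriz hne hrow hguard]
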